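-- pv_equiv track=rewrite | github.com/kapeYuan/APE-Bench_I | submission.py | _is_valid_diff_format
-- ===== SOURCE A (Python) =====
-- def _is_valid_diff_format(diff_content: str) -> bool:
--     """Basic validation of diff format"""
--     if not diff_content:
--         return False
--
--     lines = diff_content.split('\n')
--
--     # Check for basic diff structure
--     has_file_headers = any(line.startswith('---') for line in lines)
--     has_plus_headers = any(line.startswith('+++') for line in lines)
--     has_hunk_headers = any(line.startswith('@@') for line in lines)
--
--     return has_file_headers and has_plus_headers and has_hunk_headers
-- ===== SOURCE B (Python) =====
-- def _is_valid_diff_format(diff_content: str) -> bool: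
--     """Basic validation of diff format (single fused scan with early exit)"""
--     has_file = False
--     has_plus = False
--     has_hunk = False
--     for line in diff_content.split('\n'):
--         if line.startswith('---'):
--             has_file = True
--         if line.startswith('+++'):
--             has_plus = True
--         if line.startswith('@@'):
--             has_hunk = True
--         if has_file and has_plus and has_hunk:
--             return True
--     return False
-- ===== Notes on version B (the rewrite author's own statement) =====
-- stated objective: alternative
-- what changed: Replaces three separate any() scans over the line list with one fused loop that maintains three header flags and returns early once all three are seen; the explicit empty-string guard disappears because splitting an empty string yields a single empty line that sets no flag.
import Mathlib
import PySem

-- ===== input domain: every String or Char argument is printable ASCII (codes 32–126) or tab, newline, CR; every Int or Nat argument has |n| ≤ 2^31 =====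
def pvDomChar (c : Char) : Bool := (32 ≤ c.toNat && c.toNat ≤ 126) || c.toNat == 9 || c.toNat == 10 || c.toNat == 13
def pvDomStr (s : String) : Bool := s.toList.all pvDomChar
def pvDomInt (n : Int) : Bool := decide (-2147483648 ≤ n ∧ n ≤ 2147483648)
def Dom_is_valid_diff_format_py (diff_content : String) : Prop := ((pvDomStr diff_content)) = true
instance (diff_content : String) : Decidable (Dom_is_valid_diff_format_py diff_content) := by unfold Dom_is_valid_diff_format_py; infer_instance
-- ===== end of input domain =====

-- B replaces A's three separate any() scans over the lines by one fused loop that keeps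
-- three header flags and returns early once all three headers were seen (alternative decomposition).

-- ===== PORT A =====
def is_valid_diff_format_py (diff_content : String) : Bool :=
  if diff_content == "" then false
  else
    -- sep "\n" is nonempty, so split? always returns some; getD [] is never taken
    let lines := (PySem.Str.split? diff_content "\n").getD []
    let has_file_headers := lines.any (fun line => PySem.Str.startswith line "---")
    let has_plus_headers := lines.any (fun line => PySem.Str.startswith line "+++")
    let has_hunk_headers := lines.any (fun line => PySem.Str.startswith line "@@")
    has_file_headers && has_plus_headers && has_hunk_headers

-- ===== PORT B =====
-- the for-loop of Source B: three flags updated per line, early `return True` when all set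
def is_valid_diff_format_alt_loop : List String → Bool → Bool → Bool → Bool
  | [], has_file, has_plus, has_hunk => has_file && has_plus && has_hunk
  | line :: rest, has_file, has_plus, has_hunk =>
    if (has_file || PySem.Str.startswith line "---") &&
       (has_plus || PySem.Str.startswith line "+++") &&
       (has_hunk || PySem.Str.startswith line "@@") then true
    else is_valid_diff_format_alt_loop rest
           (has_file || PySem.Str.startswith line "---")
           (has_plus || PySem.Str.startswith line "+++")
           (has_hunk || PySem.Str.startswith line "@@")

def is_valid_diff_format_py_alt (diff_content : String) : Bool :=
  is_valid_diff_format_alt_loop ((PySem.Str.split? diff_content "\n").getD []) false false false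

-- ===== PRECONDITION & SPEC =====
def Spec_is_valid_diff_format_py (diff_content : String) (out : Bool) : Prop := out = is_valid_diff_format_py_alt diff_content
instance (diff_content : String) (out : Bool) : Decidable (Spec_is_valid_diff_format_py diff_content out) := by unfold Spec_is_valid_diff_format_py; infer_instance

-- ===== CLAIM (what is proved, stated in full; the proofs are below) =====
def Claim_equal_is_valid_diff_format_py : Prop := ∀ (diff_content : String), Dom_is_valid_diff_format_py diff_content → Spec_is_valid_diff_format_py diff_content (is_valid_diff_format_py diff_content)

-- ===== LEMMAS AND PROOFS =====

-- The fused loop computes the conjunction of the three any-scans (flags seeding the disjunctions).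
lemma alt_loop_eq (ls : List String) (f p h : Bool) :
    is_valid_diff_format_alt_loop ls f p h =
      ((f || ls.any (fun l => PySem.Str.startswith l "---")) &&
       (p || ls.any (fun l => PySem.Str.startswith l "+++")) &&
       (h || ls.any (fun l => PySem.Str.startswith l "@@"))) := by
  induction ls generalizing f p h with
  | nil => simp [is_valid_diff_format_alt_loop]
  | cons line rest ih =>
    simp only [is_valid_diff_format_alt_loop, List.any_cons, ih]
    generalize PySem.Str.startswith line "---" = F
    generalize PySem.Str.startswith line "+++" = P
    generalize PySem.Str.startswith line "@@" = H
    generalize rest.any (fun l => PySem.Str.startswith l "---") = A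
    generalize rest.any (fun l => PySem.Str.startswith l "+++") = B
    generalize rest.any (fun l => PySem.Str.startswith l "@@") = C
    cases F <;> cases P <;> cases H <;> cases A <;> cases B <;> cases C <;>
      cases f <;> cases p <;> cases h <;> rfl

-- ===== VERDICT (by name: the statement is the Claim_ definition above) =====
theorem is_valid_diff_format_py_spec : Claim_equal_is_valid_diff_format_py := by
  intro s _
  unfold Spec_is_valid_diff_format_py
  by_cases hs : s = ""
  · subst hs; decide
  · unfold is_valid_diff_format_py is_valid_diff_format_py_alt
    rw [alt_loop_eq]
    simp [hs]
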